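-- pv_equiv track=rewrite | github.com/maraneagu/SortingAlgorithms-Python | sorting_algorithms_code/sorting_algorithms.py | counting_sort_for_radix_b
-- ===== SOURCE A (Python) =====
-- def counting_sort_for_radix_b(array, power):
--     sortedArray = [0 for x in range(len(array))]
--     frequency = [0, 0]
--
--     for element in array:
--         frequency[(element >> power) & 1] += 1
--
--     frequency[1] += frequency[0]
--
--     i = len(array) - 1
--     while i >= 0:
--         if frequency[(array[i] >> power) & 1] != 0:
--             frequency[(array[i] >> power) & 1] -= 1
--             sortedArray[frequency[(array[i] >> power) & 1]] = array[i]
--         i -= 1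
--     return sortedArray
-- ===== SOURCE B (Python) =====
-- def counting_sort_for_radix_b(array, power):
--     zeros = []
--     ones = []
--     for element in array:
--         if (element >> power) & 1:
--             ones.append(element)
--         else:
--             zeros.append(element)
--     return zeros + ones
-- ===== Notes on version B (the rewrite author's own statement) =====
-- stated objective: simpler
-- what changed: Replaced the frequency count + prefix sum + backward scatter into a pre-sized array by a single forward pass that partitions elements into a zeros list and a ones list (stable) and returns their concatenation.
import Mathlib
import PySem

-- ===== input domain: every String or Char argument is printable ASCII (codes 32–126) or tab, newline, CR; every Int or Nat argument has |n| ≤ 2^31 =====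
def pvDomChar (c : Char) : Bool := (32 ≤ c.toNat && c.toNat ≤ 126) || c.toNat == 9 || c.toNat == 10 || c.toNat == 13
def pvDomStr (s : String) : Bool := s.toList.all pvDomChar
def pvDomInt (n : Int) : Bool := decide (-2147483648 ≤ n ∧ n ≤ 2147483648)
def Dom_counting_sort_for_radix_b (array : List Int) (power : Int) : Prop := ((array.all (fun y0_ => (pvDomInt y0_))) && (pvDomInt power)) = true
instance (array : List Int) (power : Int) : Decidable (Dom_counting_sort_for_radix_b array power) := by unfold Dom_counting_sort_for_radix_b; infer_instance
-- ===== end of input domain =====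

-- B replaces A's frequency-count + prefix-sum + backward-scatter by a single forward
-- two-bucket partition (zeros ++ ones); same stable result, simpler decomposition.


-- ===== PORT A =====
-- Python's `x >> n` (n ≥ 0) is iterated floor-halving; early exit at the fixpoints 0 and -1
-- makes it fast for large n while staying exact (floordiv 0 2 = 0, floordiv (-1) 2 = -1).
def pyShiftR (x : Int) (n : Nat) : Int :=
  if x = 0 ∨ x = -1 then x
  else match n with
  | 0 => x
  | n + 1 => pyShiftR (PySem.Int.floordiv x 2) n

-- `(x >> power) & 1`; `& 1` on a Python int is `% 2` (floor mod, divisor positive).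
def pyBit (x power : Int) : Int := PySem.Int.mod (pyShiftR x power.toNat) 2

-- Python's two-slot list `frequency`, indexed by the bit (0 or 1).
def freqGet (f : Int × Int) (b : Int) : Int := if b = 0 then f.1 else f.2
def freqSet (f : Int × Int) (b : Int) (v : Int) : Int × Int := if b = 0 then (v, f.2) else (f.1, v)

-- one iteration of A's backward `while` loop, at index i (in-range in every admitted run)
def stepA (array : List Int) (power : Int) (st : (Int × Int) × List Int) (i : Nat) : (Int × Int) × List Int :=
  let x := (PySem.List.pyGet? array (i : Int)).getD 0
  let b := pyBit x power
  if freqGet st.1 b ≠ 0 then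
    let f' := freqSet st.1 b (freqGet st.1 b - 1)
    (f', st.2.set (freqGet f' b).toNat x)
  else st

def counting_sort_for_radix_b (array : List Int) (power : Int) : List Int :=
  let sortedArray := List.replicate array.length 0
  let frequency : Int × Int :=
    array.foldl (fun f element =>
      let b := pyBit element power
      freqSet f b (freqGet f b + 1)) (0, 0)
  let frequency := (frequency.1, frequency.2 + frequency.1)
  (((List.range array.length).reverse).foldl (stepA array power) (frequency, sortedArray)).2

-- ===== PORT B =====
def counting_sort_for_radix_b_alt (array : List Int) (power : Int) : List Int :=
  let zo := array.foldl (fun (zo : List Int × List Int) element =>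
      if pyBit element power ≠ 0 then (zo.1, zo.2 ++ [element])
      else (zo.1 ++ [element], zo.2)) ([], [])
  zo.1 ++ zo.2

-- ===== PRECONDITION & SPEC =====
-- Pre_ excludes negative power, on which Python's `>>` raises ValueError.
def Pre_counting_sort_for_radix_b (array : List Int) (power : Int) : Prop := 0 ≤ power
instance (array : List Int) (power : Int) : Decidable (Pre_counting_sort_for_radix_b array power) := by unfold Pre_counting_sort_for_radix_b; infer_instance
def pvWitness_counting_sort_for_radix_b : List Int × Int := ([5, 2, 7, 0, 2], 1)

def Spec_counting_sort_for_radix_b (array : List Int) (power : Int) (out : List Int) : Prop := out = counting_sort_for_radix_b_alt array power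
instance (array : List Int) (power : Int) (out : List Int) : Decidable (Spec_counting_sort_for_radix_b array power out) := by unfold Spec_counting_sort_for_radix_b; infer_instance

-- ===== CLAIM (what is proved, stated in full; the proofs are below) =====
def Claim_equal_counting_sort_for_radix_b : Prop := ∀ (array : List Int) (power : Int), Dom_counting_sort_for_radix_b array power → Pre_counting_sort_for_radix_b array power → Spec_counting_sort_for_radix_b array power (counting_sort_for_radix_b array power)

-- ===== LEMMAS AND PROOFS =====

-- the bit is 0 or 1
lemma pyBit_cases (x power : Int) : pyBit x power = 0 ∨ pyBit x power = 1 := by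
  unfold pyBit
  have := PySem.Int.mod_two_eq (pyShiftR x power.toNat)
  omega

-- write list l into s starting at position k (over-writes, keeps length)
def ws (s : List Int) (k : Nat) (l : List Int) : List Int :=
  match l with
  | [] => s
  | y :: l => ws (s.set k y) (k + 1) l

lemma ws_append (l₁ l₂ : List Int) : ∀ s k, ws s k (l₁ ++ l₂) = ws (ws s k l₁) (k + l₁.length) l₂ := by
  induction l₁ with
  | nil => intro s k; simp [ws]
  | cons y l ih => intro s k; simp [ws, ih]; ring_nf

lemma ws_set_ge (l : List Int) : ∀ s k i x, k + l.length ≤ i →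
    ws (s.set i x) k l = (ws s k l).set i x := by
  induction l with
  | nil => intro s k i x _; rfl
  | cons y l ih =>
    intro s k i x h
    have h' : k + 1 + l.length ≤ i := by simp at h; omega
    simp only [ws]
    rw [List.set_comm x y (by omega), ih _ _ _ _ h']

lemma set_take (s : List Int) (k : Nat) (y : Int) (hk : k < s.length) :
    (List.take (k + 1) s).set k y = List.take k s ++ [y] := by
  apply List.ext_getElem
  · simp; omega
  · intro i h1 h2
    simp only [List.getElem_set, List.getElem_take]
    rcases Nat.lt_or_ge i k with hi | hi
    · rw [if_neg (by omega), List.getElem_append_left (by simp; omega)]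
      simp
    · have : i = k := by simp at h1; omega
      subst this
      rw [if_pos rfl, List.getElem_append_right (by simp)]
      simp

lemma ws_eq (l : List Int) : ∀ s k, k + l.length ≤ s.length →
    ws s k l = s.take k ++ l ++ s.drop (k + l.length) := by
  induction l with
  | nil => intro s k h; simp [ws]
  | cons y l ih =>
    intro s k h
    simp only [List.length_cons] at h
    rw [ws, ih _ _ (by simp; omega)]
    have hk : k < s.length := by omega
    have h1 : (s.set k y).take (k+1) = s.take k ++ [y] := by
      rw [List.take_set, set_take s k y hk]
    have h2 : (s.set k y).drop (k + 1 + l.length) = s.drop (k + (l.length + 1)) := by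
      rw [List.drop_set_of_lt (by omega)]
      ring_nf
    rw [h1, h2]
    simp

-- B's fold accumulates the two filters in order
lemma b_fold (power : Int) (xs : List Int) : ∀ z o,
    xs.foldl (fun (zo : List Int × List Int) element =>
      if pyBit element power ≠ 0 then (zo.1, zo.2 ++ [element])
      else (zo.1 ++ [element], zo.2)) (z, o)
    = (z ++ xs.filter (fun x => pyBit x power == 0),
       o ++ xs.filter (fun x => !(pyBit x power == 0))) := by
  induction xs with
  | nil => intro z o; simp
  | cons x xs ih =>
    intro z o
    by_cases h : pyBit x power = 0
    · rw [List.foldl_cons,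
          show (if pyBit x power ≠ 0 then ((z, o).1, (z, o).2 ++ [x])
                else ((z, o).1 ++ [x], (z, o).2)) = (z ++ [x], o) from by simp [h], ih]
      simp [List.filter_cons, h]
    · rw [List.foldl_cons,
          show (if pyBit x power ≠ 0 then ((z, o).1, (z, o).2 ++ [x])
                else ((z, o).1 ++ [x], (z, o).2)) = (z, o ++ [x]) from by simp [h], ih]
      simp [List.filter_cons, h]

lemma b_spec (array : List Int) (power : Int) :
    counting_sort_for_radix_b_alt array power
      = array.filter (fun x => pyBit x power == 0) ++ array.filter (fun x => !(pyBit x power == 0)) := by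
  unfold counting_sort_for_radix_b_alt
  rw [b_fold]
  simp

-- the counting fold of A counts the two filters
lemma a_count (power : Int) (xs : List Int) : ∀ c0 c1 : Int,
    xs.foldl (fun f element =>
      let b := pyBit element power
      freqSet f b (freqGet f b + 1)) (c0, c1)
    = (c0 + (xs.filter (fun x => pyBit x power == 0)).length,
       c1 + (xs.filter (fun x => !(pyBit x power == 0))).length) := by
  induction xs with
  | nil => intro c0 c1; simp
  | cons x xs ih =>
    intro c0 c1
    by_cases h : pyBit x power = 0
    · rw [List.foldl_cons,
          show (let b := pyBit x power
                freqSet (c0, c1) b (freqGet (c0, c1) b + 1)) = (c0 + 1, c1) from by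
            simp [freqGet, freqSet, h], ih]
      simp [List.filter_cons, h]
      ring_nf
    · rw [List.foldl_cons,
          show (let b := pyBit x power
                freqSet (c0, c1) b (freqGet (c0, c1) b + 1)) = (c0, c1 + 1) from by
            simp [freqGet, freqSet, h], ih]
      simp [List.filter_cons, h]
      ring_nf

-- A's backward while loop, written as structural recursion over the REVERSED element list
def loopR (power : Int) (rxs : List Int) (f : Int × Int) (s : List Int) : List Int :=
  match rxs with
  | [] => s
  | x :: r =>
    let b := pyBit x power
    if freqGet f b ≠ 0 then
      let f' := freqSet f b (freqGet f b - 1)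
      loopR power r f' (s.set (freqGet f' b).toNat x)
    else loopR power r f s

-- the index-fold of port A equals loopR on the reversed list
lemma a_fold_eq_loopR (power : Int) (xs : List Int) : ∀ f s,
    (((List.range xs.length).reverse).foldl (stepA xs power) (f, s)).2
      = loopR power xs.reverse f s := by
  induction xs using List.reverseRecOn with
  | nil => intro f s; simp [loopR]
  | append_singleton xs x ih =>
    intro f s
    have hlen : (xs ++ [x]).length = xs.length + 1 := by simp
    rw [hlen, List.range_succ, List.reverse_append, List.reverse_singleton]
    simp only [List.singleton_append, List.foldl_cons]
    have hstep : ∀ (st : (Int × Int) × List Int),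
        ((List.range xs.length).reverse).foldl (stepA (xs ++ [x]) power) st
          = ((List.range xs.length).reverse).foldl (stepA xs power) st := by
      intro st
      apply PySem.List.foldl_congr_mem
      intro acc i hi
      have hi' : i < xs.length := by simpa using hi
      unfold stepA
      rw [PySem.List.pyGet?_natCast, PySem.List.pyGet?_natCast,
          List.getElem?_append_left hi']
    have hx : stepA (xs ++ [x]) power (f, s) xs.length
        = (let b := pyBit x power;
           if freqGet f b ≠ 0 then
             let f' := freqSet f b (freqGet f b - 1)
             (f', s.set (freqGet f' b).toNat x)
           else (f, s)) := by
      unfold stepA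
      rw [PySem.List.pyGet?_natCast]
      simp [List.getElem?_append_right, Nat.le_refl]
    rw [hstep, hx]
    simp only [List.reverse_append, List.reverse_singleton, List.singleton_append, loopR]
    by_cases h : freqGet f (pyBit x power) = 0
    · simp only [if_neg (show ¬(freqGet f (pyBit x power) ≠ 0) from by simp [h])]
      exact ih f s
    · simp only [if_pos (show freqGet f (pyBit x power) ≠ 0 from h)]
      exact ih _ _

-- one step of loopR on each kind of element (guard true, so the write happens)
lemma loopR_cons0 (power x : Int) (r : List Int) (f0 f1 : Int) (s : List Int)
    (hx : pyBit x power = 0) (h0 : f0 ≠ 0) :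
    loopR power (x :: r) (f0, f1) s = loopR power r (f0 - 1, f1) (s.set (f0 - 1).toNat x) := by
  simp [loopR, freqGet, freqSet, hx, h0]

lemma loopR_cons1 (power x : Int) (r : List Int) (f0 f1 : Int) (s : List Int)
    (hx : pyBit x power = 1) (h1 : f1 ≠ 0) :
    loopR power (x :: r) (f0, f1) s = loopR power r (f0, f1 - 1) (s.set (f1 - 1).toNat x) := by
  simp [loopR, freqGet, freqSet, hx, h1]

-- main invariant: the backward scatter with correct frequencies performs two segment writes
lemma loopR_spec (power : Int) (xs : List Int) : ∀ (s : List Int) (a b : Nat),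
    a + (xs.filter (fun v => pyBit v power == 0)).length ≤ b →
    b + (xs.filter (fun v => !(pyBit v power == 0))).length ≤ s.length →
    loopR power xs.reverse
      (((a + (xs.filter (fun v => pyBit v power == 0)).length : Nat) : Int),
       ((b + (xs.filter (fun v => !(pyBit v power == 0))).length : Nat) : Int)) s
      = ws (ws s a (xs.filter (fun v => pyBit v power == 0))) b
           (xs.filter (fun v => !(pyBit v power == 0))) := by
  induction xs using List.reverseRecOn with
  | nil => intro s a b h1 h2; simp [loopR, ws]
  | append_singleton xs x ih =>
    intro s a b h1 h2
    set F := xs.filter (fun v => pyBit v power == 0) with hF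
    set T := xs.filter (fun v => !(pyBit v power == 0)) with hT
    have hb := pyBit_cases x power
    by_cases hx : pyBit x power = 0
    · -- x goes into the zero bucket
      have hFx : (xs ++ [x]).filter (fun v => pyBit v power == 0) = F ++ [x] := by
        simp [List.filter_append, hx]
        exact hF.symm
      have hTx : (xs ++ [x]).filter (fun v => !(pyBit v power == 0)) = T := by
        simp [List.filter_append, hx]
        exact hT.symm
      rw [hFx] at h1 ⊢
      rw [hTx] at h2 ⊢
      simp only [List.length_append, List.length_cons, List.length_nil, Nat.zero_add] at h1 ⊢
      rw [List.reverse_append, List.reverse_singleton, List.singleton_append,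
          loopR_cons0 power x xs.reverse _ _ s hx (Int.natCast_ne_zero.mpr (by omega))]
      rw [show ((a + (F.length + 1) : Nat) : Int) - 1 = ((a + F.length : Nat) : Int) from by
            push_cast; ring,
          Int.toNat_natCast]
      rw [ih (s.set (a + F.length) x) a b (by omega) (by simp; omega)]
      rw [ws_append, ws_set_ge F s a (a + F.length) x (by omega)]
      simp [ws]
    · -- x goes into the one bucket
      have hx1 : pyBit x power = 1 := by tauto
      have hFx : (xs ++ [x]).filter (fun v => pyBit v power == 0) = F := by
        simp [List.filter_append, hx]
        exact hF.symm
      have hTx : (xs ++ [x]).filter (fun v => !(pyBit v power == 0)) = T ++ [x] := by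
        simp [List.filter_append, hx]
        exact hT.symm
      rw [hFx] at h1 ⊢
      rw [hTx] at h2 ⊢
      simp only [List.length_append, List.length_cons, List.length_nil, Nat.zero_add] at h2 ⊢
      rw [List.reverse_append, List.reverse_singleton, List.singleton_append,
          loopR_cons1 power x xs.reverse _ _ s hx1 (Int.natCast_ne_zero.mpr (by omega))]
      rw [show ((b + (T.length + 1) : Nat) : Int) - 1 = ((b + T.length : Nat) : Int) from by
            push_cast; ring,
          Int.toNat_natCast]
      rw [ih (s.set (b + T.length) x) a b (by omega) (by simp; omega)]
      rw [ws_append, ws_set_ge F s a (b + T.length) x (by omega),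
          ws_set_ge T _ b (b + T.length) x (by omega)]
      simp [ws]

lemma filter_lengths (power : Int) (xs : List Int) :
    (xs.filter (fun x => pyBit x power == 0)).length
      + (xs.filter (fun x => !(pyBit x power == 0))).length = xs.length := by
  have h := List.length_eq_length_filter_add (l := xs) (fun x => pyBit x power == 0)
  omega

lemma a_spec (array : List Int) (power : Int) :
    counting_sort_for_radix_b array power
      = array.filter (fun x => pyBit x power == 0) ++ array.filter (fun x => !(pyBit x power == 0)) := by
  unfold counting_sort_for_radix_b
  set F := array.filter (fun x => pyBit x power == 0) with hF
  set T := array.filter (fun x => !(pyBit x power == 0)) with hT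
  have hlen : F.length + T.length = array.length := filter_lengths power array
  rw [a_count power array 0 0]
  simp only [Int.zero_add]
  rw [show ((T.length : Int) + (F.length : Int)) = ((F.length + T.length : Nat) : Int) by push_cast; ring]
  rw [show ((F.length : Int)) = ((0 + F.length : Nat) : Int) by push_cast; ring]
  rw [a_fold_eq_loopR,
      loopR_spec power array (List.replicate array.length 0) 0 F.length
        (by simp only [← hF]; omega)
        (by simp only [← hF, ← hT, List.length_replicate]; omega)]
  rw [ws_eq F _ 0 (by simp only [← hF, ← hT, List.length_replicate]; omega)]
  simp only [List.take_zero, List.nil_append, Nat.zero_add, List.drop_replicate]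
  rw [ws_eq T _ F.length (by simp only [← hF, ← hT, List.length_append, List.length_replicate]; omega)]
  have h1 : (F ++ List.replicate (array.length - F.length) 0).take F.length = F := by
    simp
  have h2 : (F ++ List.replicate (array.length - F.length) 0).drop (F.length + T.length) = [] := by
    apply List.drop_eq_nil_of_le
    simp; omega
  rw [h1, h2]
  simp

-- ===== VERDICT (by name: the statement is the Claim_ definition above) =====
theorem counting_sort_for_radix_b_spec : Claim_equal_counting_sort_for_radix_b := by
  intro array power _ _
  unfold Spec_counting_sort_for_radix_b
  rw [a_spec, b_spec]
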